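-- pv_equiv track=rewrite | github.com/MrBrantCode/unitest_baseline | mut_generate/mist_train_cf/cf_87877/solution.py | same_orientation
-- ===== SOURCE A (Python) =====
-- def same_orientation(arr):
--     if len(arr) <= 1:
--         return True
--     elif arr[0] == 0:
--         return all(x == 0 for x in arr)
--     else:
--         orientation = arr[0] > 0
--         for num in arr:
--             if (num > 0) != orientation and num != 0:
--                 return False
--         return True
-- ===== SOURCE B (Python) =====
-- def same_orientation(arr):
--     if len(arr) <= 1:
--         return True
--     has_pos = any(x > 0 for x in arr)
--     has_neg = any(x < 0 for x in arr)
--     if arr[0] == 0: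
--         return not has_pos and not has_neg
--     return not (has_pos and has_neg)
-- ===== Notes on version B (the rewrite author's own statement) =====
-- stated objective: simpler
-- what changed: Replaces the anchored early-exit per-element loop (orientation taken from arr[0], comparing each element against it) with two symmetric aggregate checks has_pos/has_neg combined by a short case analysis on the first element.
import Mathlib
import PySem

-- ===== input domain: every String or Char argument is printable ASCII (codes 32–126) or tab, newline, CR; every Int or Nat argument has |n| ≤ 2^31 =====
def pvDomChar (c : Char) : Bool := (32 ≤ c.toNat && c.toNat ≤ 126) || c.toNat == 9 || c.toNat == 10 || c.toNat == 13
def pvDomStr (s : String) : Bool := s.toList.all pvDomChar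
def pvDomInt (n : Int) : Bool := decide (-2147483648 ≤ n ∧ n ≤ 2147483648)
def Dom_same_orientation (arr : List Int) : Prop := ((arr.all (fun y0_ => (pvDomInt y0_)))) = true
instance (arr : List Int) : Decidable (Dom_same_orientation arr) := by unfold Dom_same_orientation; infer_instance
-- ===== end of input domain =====

-- B replaces A's anchored early-exit per-element loop with symmetric has_pos/has_neg aggregates combined by case analysis (simpler decomposition, same O(n) cost).


-- ===== PORT A =====
-- the 'for num in arr' loop with its early 'return False'
def pvLoopA (orientation : Bool) : List Int → Bool
  | [] => true
  | num :: rest =>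
      if (decide (num > 0) != orientation) && num ≠ 0 then false
      else pvLoopA orientation rest

def same_orientation (arr : List Int) : Bool :=
  if arr.length ≤ 1 then true
  else
    match arr with
    | [] => true  -- unreachable: length ≥ 2
    | a :: _ =>
        if a = 0 then arr.all (fun x => x == 0)
        else pvLoopA (decide (a > 0)) arr

-- ===== PORT B =====
def same_orientation_alt (arr : List Int) : Bool :=
  if arr.length ≤ 1 then true
  else
    let hasPos := arr.any (fun x => decide (x > 0))
    let hasNeg := arr.any (fun x => decide (x < 0))
    match arr with
    | [] => true  -- unreachable: length ≥ 2
    | a :: _ =>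
        if a = 0 then !hasPos && !hasNeg
        else !(hasPos && hasNeg)

-- ===== PRECONDITION & SPEC =====
def Spec_same_orientation (arr : List Int) (out : Bool) : Prop := out = same_orientation_alt arr
instance (arr : List Int) (out : Bool) : Decidable (Spec_same_orientation arr out) := by unfold Spec_same_orientation; infer_instance

-- ===== CLAIM (what is proved, stated in full; the proofs are below) =====
def Claim_equal_same_orientation : Prop := ∀ (arr : List Int), Dom_same_orientation arr → Spec_same_orientation arr (same_orientation arr)

-- ===== LEMMAS AND PROOFS =====
theorem pvLoopA_true (l : List Int) :
    pvLoopA true l = !(l.any (fun x => decide (x < 0))) := by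
  induction l with
  | nil => rfl
  | cons n t ih =>
      simp only [pvLoopA, List.any_cons]
      rcases lt_trichotomy n 0 with h | h | h
      · simp [h, show ¬ n > 0 by omega, show n ≠ 0 by omega]
      · simp [h, ih]
      · simp [h, show ¬ n < 0 by omega, show n ≠ 0 by omega, ih]

theorem pvLoopA_false (l : List Int) :
    pvLoopA false l = !(l.any (fun x => decide (x > 0))) := by
  induction l with
  | nil => rfl
  | cons n t ih =>
      simp only [pvLoopA, List.any_cons]
      rcases lt_trichotomy n 0 with h | h | h
      · simp [show ¬ n > 0 by omega, show n ≠ 0 by omega, ih]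
      · simp [h, ih]
      · simp [h, show n ≠ 0 by omega]

theorem all_zero_iff (l : List Int) :
    (l.all (fun x => x == 0))
      = (!(l.any (fun x => decide (x > 0))) && !(l.any (fun x => decide (x < 0)))) := by
  induction l with
  | nil => rfl
  | cons n t ih =>
      simp only [List.all_cons, List.any_cons, ih]
      by_cases h : n = 0
      · simp [h]
      · by_cases h2 : n > 0 <;> [skip; have h3 : n < 0 := by omega] <;> simp_all

-- ===== VERDICT (by name: the statement is the Claim_ definition above) =====
theorem same_orientation_spec : Claim_equal_same_orientation := by
  intro arr _
  unfold Spec_same_orientation same_orientation same_orientation_alt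
  by_cases hlen : arr.length ≤ 1
  · simp [hlen]
  · simp only [hlen, if_false]
    match arr with
    | [] => rfl
    | a :: t =>
        by_cases ha : a = 0
        · simp only [ha, if_true, all_zero_iff]
        · simp only [ha, if_false]
          by_cases hp : a > 0
          · have : decide (a > 0) = true := by simp [hp]
            rw [this, pvLoopA_true]
            simp [hp]
          · have hn : a < 0 := by omega
            have : decide (a > 0) = false := by simp; omega
            rw [this, pvLoopA_false]
            simp [hn]
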